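-- pv_equiv track=rewrite | github.com/ipcompass-technical/patent_watch | filter.py | classify_ipc_codes
-- ===== SOURCE A (Python) =====
-- from typing import List, Dict
--
-- SOFTWARE_PREFIXES = ['G06', 'H04L', 'G16H', 'G05B']
--
-- def classify_ipc_codes(ipc_codes: List[str]) -> str:
--     software_count = 0
--     other_count = 0
--
--     for code in ipc_codes:
--         if any(code.startswith(prefix) for prefix in SOFTWARE_PREFIXES):
--             software_count += 1
--         else:
--             other_count += 1
--
--     if software_count > 0 and other_count > 0:
--         return 'Hybrid'
--     if software_count > 0 and other_count == 0:
--         return 'Software'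
--     return 'Non-Software'
-- ===== SOURCE B (Python) =====
-- from typing import List
--
-- SOFTWARE_PREFIXES = ['G06', 'H04L', 'G16H', 'G05B']
--
-- def _is_software(code: str) -> bool:
--     # fixed-width slice tests instead of a startswith scan over the prefix list
--     return code[:3] == 'G06' or code[:4] in ('H04L', 'G16H', 'G05B')
--
-- def classify_ipc_codes(ipc_codes: List[str]) -> str:
--     # Classify the head, then scan the tail for the first disagreement (early exit);
--     # no counters: a mixed list is Hybrid the moment two codes disagree.
--     if not ipc_codes:
--         return 'Non-Software'
--     base = _is_software(ipc_codes[0])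
--     for code in ipc_codes[1:]:
--         if _is_software(code) != base:
--             return 'Hybrid'
--     return 'Software' if base else 'Non-Software'
-- ===== Notes on version B (the rewrite author's own statement) =====
-- stated objective: alternative
-- what changed: Drops the counters and the full counting pass: B classifies the head code via fixed-width slice comparisons (code[:3]/code[:4] against literals instead of an any(startswith) generator over the prefix list) and scans the tail only until the first code whose class disagrees with the head, returning 'Hybrid' immediately.
import Mathlib
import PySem

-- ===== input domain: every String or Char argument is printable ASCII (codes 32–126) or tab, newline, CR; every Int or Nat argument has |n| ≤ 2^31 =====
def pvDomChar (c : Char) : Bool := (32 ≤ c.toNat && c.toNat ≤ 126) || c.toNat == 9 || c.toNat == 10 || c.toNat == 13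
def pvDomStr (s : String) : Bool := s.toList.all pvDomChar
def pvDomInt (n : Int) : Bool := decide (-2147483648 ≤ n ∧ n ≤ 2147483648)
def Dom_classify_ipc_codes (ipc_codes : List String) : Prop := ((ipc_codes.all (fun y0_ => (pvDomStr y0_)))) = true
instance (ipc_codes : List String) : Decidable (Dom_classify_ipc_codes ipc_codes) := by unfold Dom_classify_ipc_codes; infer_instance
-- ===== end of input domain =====

-- B replaces A's counting pass with a head-classification plus an early-exit tail scan for the first disagreement, and tests prefixes by fixed-width slices (alternative decomposition, same cost).


def SOFTWARE_PREFIXES : List String := ["G06", "H04L", "G16H", "G05B"]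

-- ===== PORT A =====
def classify_ipc_codes (ipc_codes : List String) : String :=
  -- for code in ipc_codes: if any(code.startswith(prefix) …): software_count += 1 else: other_count += 1
  let counts : Int × Int := ipc_codes.foldl
    (fun acc code =>
      if SOFTWARE_PREFIXES.any (fun prefix_ => PySem.Str.startswith code prefix_) then
        (acc.1 + 1, acc.2)
      else
        (acc.1, acc.2 + 1))
    (0, 0)
  if counts.1 > 0 ∧ counts.2 > 0 then "Hybrid"
  else if counts.1 > 0 ∧ counts.2 = 0 then "Software"
  else "Non-Software"

-- ===== PORT B =====
-- code[:3] == 'G06' or code[:4] in ('H04L', 'G16H', 'G05B')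
def pvIsSoftware (code : String) : Bool :=
  PySem.Str.slice code none (some 3) == "G06" ||
  (["H04L", "G16H", "G05B"] : List String).contains (PySem.Str.slice code none (some 4))

def classify_ipc_codes_alt (ipc_codes : List String) : String :=
  match ipc_codes with
  | [] => "Non-Software"                     -- if not ipc_codes: return 'Non-Software'
  | first :: rest =>
    let base := pvIsSoftware first
    -- for code in ipc_codes[1:]: if _is_software(code) != base: return 'Hybrid'   (early exit = List.any)
    if rest.any (fun code => pvIsSoftware code != base) then "Hybrid"
    else if base then "Software" else "Non-Software"

-- ===== PRECONDITION & SPEC =====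
def Spec_classify_ipc_codes (ipc_codes : List String) (out : String) : Prop := out = classify_ipc_codes_alt ipc_codes
instance (ipc_codes : List String) (out : String) : Decidable (Spec_classify_ipc_codes ipc_codes out) := by unfold Spec_classify_ipc_codes; infer_instance

-- ===== CLAIM (what is proved, stated in full; the proofs are below) =====
def Claim_equal_classify_ipc_codes : Prop := ∀ (ipc_codes : List String), Dom_classify_ipc_codes ipc_codes → Spec_classify_ipc_codes ipc_codes (classify_ipc_codes ipc_codes)

-- ===== LEMMAS AND PROOFS =====

-- A's per-code test, as a named predicate for the proofs
def pvFlag (code : String) : Bool :=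
  SOFTWARE_PREFIXES.any (fun prefix_ => PySem.Str.startswith code prefix_)

-- B's fixed-width slice test agrees with A's startswith scan on every string
theorem pvIsSoftware_eq (code : String) : pvIsSoftware code = pvFlag code := by
  unfold pvIsSoftware pvFlag SOFTWARE_PREFIXES
  have h3 : (PySem.Str.slice code none (some 3)).toList = code.toList.take 3 := by
    rw [PySem.Str.toList_slice, PySem.Chars.slice_eq_listSlice,
      PySem.List.slice_to _ (by norm_num)]
    rfl
  have h4 : (PySem.Str.slice code none (some 4)).toList = code.toList.take 4 := by
    rw [PySem.Str.toList_slice, PySem.Chars.slice_eq_listSlice,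
      PySem.List.slice_to _ (by norm_num)]
    rfl
  have hsw : ∀ p : String, PySem.Str.startswith code p
      = (p.toList == code.toList.take p.toList.length) := by
    intro p
    rw [Bool.eq_iff_iff, beq_iff_eq, PySem.Str.startswith_eq,
      PySem.Chars.startswith_iff, List.prefix_iff_eq_take]
  have e1 : (PySem.Str.slice code none (some 3) == "G06")
      = (code.toList.take (Int.toNat 3) == "G06".toList) := by
    rw [Bool.eq_iff_iff, beq_iff_eq, beq_iff_eq, ← String.toList_inj, h3]
    rfl
  have e2 : ∀ s : String, (PySem.Str.slice code none (some 4) == s)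
      = (code.toList.take (Int.toNat 4) == s.toList) := by
    intro s
    rw [Bool.eq_iff_iff, beq_iff_eq, beq_iff_eq, ← String.toList_inj, h4]
    rfl
  rw [Bool.eq_iff_iff]
  simp only [List.contains_eq_mem, List.mem_cons, List.not_mem_nil, or_false,
    List.any_cons, List.any_nil, Bool.or_eq_true, decide_eq_true_eq,
    ← beq_iff_eq (a := PySem.Str.slice code none (some 4)), e1, e2, hsw, beq_iff_eq,
    show ("G06".toList).length = 3 from by decide,
    show ("H04L".toList).length = 4 from by decide,
    show ("G16H".toList).length = 4 from by decide,
    show ("G05B".toList).length = 4 from by decide]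
  constructor
  · rintro (h | h | h | h)
    · exact Or.inl h.symm
    · exact Or.inr (Or.inl h.symm)
    · exact Or.inr (Or.inr (Or.inl h.symm))
    · exact Or.inr (Or.inr (Or.inr (Or.inl h.symm)))
  · rintro (h | h | h | h | h)
    · exact Or.inl h.symm
    · exact Or.inr (Or.inl h.symm)
    · exact Or.inr (Or.inr (Or.inl h.symm))
    · exact Or.inr (Or.inr (Or.inr h.symm))
    · cases h

-- A's loop computes (a + #software codes, b + #other codes) from any start (a, b).
theorem pv_counts (ipc_codes : List String) (a b : Int) :
    ipc_codes.foldl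
      (fun acc code =>
        if SOFTWARE_PREFIXES.any (fun prefix_ => PySem.Str.startswith code prefix_) then
          (acc.1 + 1, acc.2)
        else
          (acc.1, acc.2 + 1))
      (a, b)
    = (a + (ipc_codes.countP pvFlag : Int), b + (ipc_codes.countP (fun c => !pvFlag c) : Int)) := by
  induction ipc_codes generalizing a b with
  | nil => simp
  | cons x xs ih =>
    rw [List.foldl_cons]
    by_cases h : (SOFTWARE_PREFIXES.any fun prefix_ => PySem.Str.startswith x prefix_) = true
    · rw [if_pos h, ih]
      have h1 : pvFlag x = true := h
      simp only [List.countP_cons, h1, Bool.not_true, if_true, if_neg Bool.false_ne_true,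
        Prod.mk.injEq]
      constructor <;> push_cast <;> ring
    · rw [if_neg h, ih]
      rw [Bool.not_eq_true] at h
      have h1 : pvFlag x = false := h
      simp only [List.countP_cons, h1, Bool.not_false, if_true, if_neg Bool.false_ne_true,
        Prod.mk.injEq]
      constructor <;> push_cast <;> ring

-- ===== VERDICT (by name: the statement is the Claim_ definition above) =====
theorem classify_ipc_codes_spec : Claim_equal_classify_ipc_codes := by
  intro ipc_codes _
  unfold Spec_classify_ipc_codes
  cases ipc_codes with
  | nil => rfl
  | cons x xs =>
    unfold classify_ipc_codes classify_ipc_codes_alt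
    rw [pv_counts]
    simp only [pvIsSoftware_eq, zero_add]
    have hsw : (0 : Int) < ((x :: xs).countP pvFlag : Int) ↔ ∃ c ∈ x :: xs, pvFlag c = true := by
      rw [Int.natCast_pos, List.countP_pos_iff]
    have hot : (0 : Int) < ((x :: xs).countP (fun c => !pvFlag c) : Int) ↔ ∃ c ∈ x :: xs, pvFlag c = false := by
      rw [Int.natCast_pos, List.countP_pos_iff]; simp
    by_cases hmix : xs.any (fun code => pvFlag code != pvFlag x) = true
    · rw [if_pos hmix]
      obtain ⟨c, hc, hne⟩ := List.any_eq_true.mp hmix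
      rw [bne_iff_ne] at hne
      have hboth : (∃ c ∈ x :: xs, pvFlag c = true) ∧ (∃ c ∈ x :: xs, pvFlag c = false) := by
        cases hx : pvFlag x with
        | true =>
          refine ⟨⟨x, List.mem_cons_self, hx⟩, ⟨c, List.mem_cons_of_mem _ hc, ?_⟩⟩
          rw [hx] at hne; exact Bool.eq_false_iff.mpr hne
        | false =>
          refine ⟨⟨c, List.mem_cons_of_mem _ hc, ?_⟩, ⟨x, List.mem_cons_self, hx⟩⟩
          rw [hx] at hne; exact Bool.ne_false_iff.mp hne
      rw [if_pos ⟨hsw.mpr hboth.1, hot.mpr hboth.2⟩]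
    · rw [if_neg hmix]
      have hall : ∀ c ∈ xs, pvFlag c = pvFlag x := by
        intro c hc
        by_contra hne
        exact hmix (List.any_eq_true.mpr ⟨c, hc, bne_iff_ne.mpr hne⟩)
      cases hx : pvFlag x with
      | true =>
        rw [if_pos rfl]
        have hno : ¬ ∃ c ∈ x :: xs, pvFlag c = false := by
          rintro ⟨c, hc, hcf⟩
          rcases List.mem_cons.mp hc with rfl | hc'
          · rw [hx] at hcf; cases hcf
          · rw [hall c hc', hx] at hcf; cases hcf
        have hz : ((x :: xs).countP (fun c => !pvFlag c) : Int) = 0 := by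
          by_contra h0
          exact hno (hot.mp (lt_of_le_of_ne (Int.natCast_nonneg _) (Ne.symm h0)))
        rw [if_neg (by rw [hz]; omega), if_pos ⟨hsw.mpr ⟨x, List.mem_cons_self, hx⟩, hz⟩]
      | false =>
        have hno : ¬ ∃ c ∈ x :: xs, pvFlag c = true := by
          rintro ⟨c, hc, hct⟩
          rcases List.mem_cons.mp hc with rfl | hc'
          · rw [hx] at hct; cases hct
          · rw [hall c hc', hx] at hct; cases hct
        have hz : ¬ (0 : Int) < ((x :: xs).countP pvFlag : Int) := fun h => hno (hsw.mp h)
        rw [if_neg (fun h => hz h.1), if_neg (fun h => hz h.1), if_neg Bool.false_ne_true]
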